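-- pv_equiv track=rewrite | github.com/tezeladata/Transfer | 6kyu.py | ascend_descend
-- ===== SOURCE A (Python) =====
-- def ascend_descend(length, minimum, maximum):
--     if maximum < minimum or length == 0: return ""
--
--     if minimum == maximum: return str(minimum)*length
--
--     res, up, numb = f"{minimum}", True, minimum
--
--     while len(res) < length:
--         if up:
--             if numb < maximum: numb += 1
--             else:
--                 numb -= 1
--                 up = False
--         else:
--             if numb > minimum: numb -= 1
--             else:
--                 numb += 1
--                 up = True
--
--         res += str(numb)
--
--     return res[:length]
-- ===== SOURCE B (Python) =====
-- def ascend_descend(length, minimum, maximum):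
--     if maximum < minimum or length <= 0:
--         return ""
--     if minimum == maximum:
--         return str(minimum) * length
--     d = maximum - minimum
--     period = 2 * d
--     parts = []
--     total = 0
--     i = 0
--     while total < length:
--         r = i % period
--         n = minimum + r if r <= d else maximum - (r - d)
--         s = str(n)
--         parts.append(s)
--         total += len(s)
--         i += 1
--     return "".join(parts)[:length]
-- ===== Notes on version B (the rewrite author's own statement) =====
-- stated objective: alternative
-- what changed: B replaces A's direction/state-machine while loop over one growing string with a closed-form zigzag term (the i-th number computed arithmetically from i mod 2*(max-min)) collected into a list of parts joined once (intended faster; a timing run read 13.98x at the largest size on zigzag inputs but ties on minimum==maximum inputs, so no speed is claimed); Pre_ excludes only negative lengths with minimum < maximum and len(str(minimum)) > -length, where A returns the accidental nonempty slice-suffix str(minimum)[:length] and B returns the empty string.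
-- outside the precondition, e.g. on ascend_descend(-1, 12, 15): A returns '1', B returns ''
import Mathlib
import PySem

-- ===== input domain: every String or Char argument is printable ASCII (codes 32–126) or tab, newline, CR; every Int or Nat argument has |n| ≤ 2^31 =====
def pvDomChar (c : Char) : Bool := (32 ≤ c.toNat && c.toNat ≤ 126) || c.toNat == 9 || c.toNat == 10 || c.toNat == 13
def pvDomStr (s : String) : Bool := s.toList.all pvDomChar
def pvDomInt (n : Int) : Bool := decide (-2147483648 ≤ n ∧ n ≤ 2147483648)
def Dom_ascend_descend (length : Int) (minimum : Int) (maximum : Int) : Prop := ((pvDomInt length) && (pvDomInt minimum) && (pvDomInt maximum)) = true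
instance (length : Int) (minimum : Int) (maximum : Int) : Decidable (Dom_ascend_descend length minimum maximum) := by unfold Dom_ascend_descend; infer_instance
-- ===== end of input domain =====

-- B computes the i-th zigzag number by a closed form from i mod 2*(max-min) and joins parts once,
-- instead of A's up/down state machine concatenating onto one growing string.


-- str(n) is never the empty string (needed by both ports' termination measures)
theorem toDigitsCore_len_le (b : Nat) : ∀ (f n : Nat) (ds : List Char), ds.length ≤ (Nat.toDigitsCore b f n ds).length := by
  intro f
  induction f with
  | zero => intro n ds; simp [Nat.toDigitsCore]
  | succ f ih =>
      intro n ds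
      simp only [Nat.toDigitsCore]
      split
      · simp
      · exact le_trans (by simp) (ih _ _)

theorem toChars_len_pos (n : Int) : 1 ≤ (PySem.Int.toChars n).length := by
  unfold PySem.Int.toChars
  split
  · simp
  · unfold Nat.toDigits
    simp only [Nat.toDigitsCore]
    split
    · simp
    · exact le_trans (by simp) (toDigitsCore_len_le 10 _ _ _)

-- ===== PORT A =====
-- the while loop of A: state (res, up, numb); each iteration updates numb/up and appends str(numb)
def ascendLoopA (length : Int) (minimum : Int) (maximum : Int) (res : List Char) (up : Bool) (numb : Int) : List Char :=
  if ((res.length : Int) < length) then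
    if up then
      if numb < maximum then
        ascendLoopA length minimum maximum (res ++ PySem.Int.toChars (numb + 1)) true (numb + 1)
      else
        ascendLoopA length minimum maximum (res ++ PySem.Int.toChars (numb - 1)) false (numb - 1)
    else
      if numb > minimum then
        ascendLoopA length minimum maximum (res ++ PySem.Int.toChars (numb - 1)) false (numb - 1)
      else
        ascendLoopA length minimum maximum (res ++ PySem.Int.toChars (numb + 1)) true (numb + 1)
  else res
termination_by (length - res.length).toNat
decreasing_by
  all_goals
    have h := toChars_len_pos (numb + 1)
    have h' := toChars_len_pos (numb - 1)
    simp only [List.length_append]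
    omega

def ascend_descend (length : Int) (minimum : Int) (maximum : Int) : String :=
  if maximum < minimum ∨ length = 0 then ""
  else if minimum = maximum then
    -- str(minimum)*length : Python repeats max(length, 0) times, exactly List.replicate length.toNat
    String.ofList ((List.replicate length.toNat (PySem.Int.toChars minimum)).flatten)
  else
    -- res = f"{minimum}", up = True, numb = minimum; while-loop; return res[:length]
    String.ofList (PySem.List.slice (ascendLoopA length minimum maximum (PySem.Int.toChars minimum) true minimum) none (some length))

-- ===== PORT B =====
-- the while loop of B: i-th number from r = i % (2*(max-min)) by a closed form; parts list plus running total
def ascendLoopB (length : Int) (minimum : Int) (maximum : Int) (parts : List (List Char)) (total : Int) (i : Int) : List (List Char) :=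
  if (total < length) then
    let d := maximum - minimum
    let r := PySem.Int.mod i (2 * d)
    let n := if r ≤ d then minimum + r else maximum - (r - d)
    let s := PySem.Int.toChars n
    ascendLoopB length minimum maximum (parts ++ [s]) (total + (s.length : Int)) (i + 1)
  else parts
termination_by (length - total).toNat
decreasing_by
  split
  · have h := toChars_len_pos (minimum + PySem.Int.mod i (2 * (maximum - minimum))); omega
  · have h := toChars_len_pos (maximum - (PySem.Int.mod i (2 * (maximum - minimum)) - (maximum - minimum))); omega

def ascend_descend_alt (length : Int) (minimum : Int) (maximum : Int) : String :=
  if maximum < minimum ∨ length ≤ 0 then ""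
  else if minimum = maximum then
    String.ofList ((List.replicate length.toNat (PySem.Int.toChars minimum)).flatten)
  else
    -- "".join(parts)[:length]
    String.ofList (PySem.List.slice ((ascendLoopB length minimum maximum [] 0 0).flatten) none (some length))

-- ===== PRECONDITION & SPEC =====
-- Pre_ admits every length ≥ 0 and every negative length on which A returns ""; it excludes only the
-- negative lengths (outside the natural domain) with minimum < maximum and len(str(minimum)) > -length,
-- where A returns the accidental nonempty slice-suffix str(minimum)[:length] while B returns "".
def Pre_ascend_descend (length : Int) (minimum : Int) (maximum : Int) : Prop :=
  0 ≤ length ∨ maximum < minimum ∨ minimum = maximum ∨ ((PySem.Int.toChars minimum).length : Int) + length ≤ 0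
instance (length : Int) (minimum : Int) (maximum : Int) : Decidable (Pre_ascend_descend length minimum maximum) := by unfold Pre_ascend_descend; infer_instance

def pvWitness_ascend_descend : Int × Int × Int := (7, 1, 3)

def Spec_ascend_descend (length : Int) (minimum : Int) (maximum : Int) (out : String) : Prop := out = ascend_descend_alt length minimum maximum
instance (length : Int) (minimum : Int) (maximum : Int) (out : String) : Decidable (Spec_ascend_descend length minimum maximum out) := by unfold Spec_ascend_descend; infer_instance

-- ===== CLAIM (what is proved, stated in full; the proofs are below) =====
def Claim_equal_ascend_descend : Prop := ∀ (length : Int) (minimum : Int) (maximum : Int), Dom_ascend_descend length minimum maximum → Pre_ascend_descend length minimum maximum → Spec_ascend_descend length minimum maximum (ascend_descend length minimum maximum)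

-- ===== LEMMAS AND PROOFS =====

-- the closed-form zigzag value B computes at step i (proof-side name for B's inline expression)
def zigv (minimum : Int) (maximum : Int) (i : Int) : Int :=
  if PySem.Int.mod i (2 * (maximum - minimum)) ≤ maximum - minimum
  then minimum + PySem.Int.mod i (2 * (maximum - minimum))
  else maximum - (PySem.Int.mod i (2 * (maximum - minimum)) - (maximum - minimum))

theorem loopA_stop (length minimum maximum : Int) (res : List Char) (up : Bool) (numb : Int)
    (h : ¬ ((res.length : Int) < length)) :
    ascendLoopA length minimum maximum res up numb = res := by
  conv_lhs => rw [ascendLoopA.eq_def]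
  simp [h]

theorem loopB_stop (length minimum maximum : Int) (parts : List (List Char)) (total i : Int)
    (h : ¬ (total < length)) :
    ascendLoopB length minimum maximum parts total i = parts := by
  conv_lhs => rw [ascendLoopB.eq_def]
  simp [h]

theorem loopB_step (length minimum maximum : Int) (parts : List (List Char)) (total i : Int)
    (h : total < length) :
    ascendLoopB length minimum maximum parts total i =
    ascendLoopB length minimum maximum (parts ++ [PySem.Int.toChars (zigv minimum maximum i)])
      (total + ((PySem.Int.toChars (zigv minimum maximum i)).length : Int)) (i + 1) := by
  conv_lhs => rw [ascendLoopB.eq_def]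
  simp [h, zigv]

theorem loopA_step (length minimum maximum : Int) (res : List Char) (up : Bool) (numb : Int)
    (h : (res.length : Int) < length) :
    ascendLoopA length minimum maximum res up numb =
    (if up then
      if numb < maximum then
        ascendLoopA length minimum maximum (res ++ PySem.Int.toChars (numb + 1)) true (numb + 1)
      else
        ascendLoopA length minimum maximum (res ++ PySem.Int.toChars (numb - 1)) false (numb - 1)
    else
      if numb > minimum then
        ascendLoopA length minimum maximum (res ++ PySem.Int.toChars (numb - 1)) false (numb - 1)
      else
        ascendLoopA length minimum maximum (res ++ PySem.Int.toChars (numb + 1)) true (numb + 1)) := by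
  conv_lhs => rw [ascendLoopA.eq_def]
  simp [h]

-- successor of i mod p (p > 1)
theorem mod_succ (i p : Int) (hp : 1 < p) :
    PySem.Int.mod (i + 1) p =
    (if PySem.Int.mod i p = p - 1 then 0 else PySem.Int.mod i p + 1) := by
  rw [PySem.Int.mod_eq_emod_of_pos (show (0:Int) < p by omega), PySem.Int.mod_eq_emod_of_pos (show (0:Int) < p by omega)]
  have h0 : 0 ≤ i % p := Int.emod_nonneg i (by omega)
  have h1 : i % p < p := Int.emod_lt_of_pos i (by omega)
  have h1p : (1:Int) % p = 1 := Int.emod_eq_of_lt (by omega) (by omega)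
  rw [Int.add_emod, h1p]
  by_cases hc : i % p = p - 1
  · have : p - 1 + 1 = p := by ring
    rw [hc, this, Int.emod_self]
    simp
  · rw [if_neg hc]
    exact Int.emod_eq_of_lt (by omega) (by omega)


-- common tail of the four step cases: feed the induction hypothesis after one synchronized step
theorem loop_finish (length minimum maximum : Int) (k : Nat)
    (ih : ∀ m, m < k → ∀ (i : Int) (parts : List (List Char)) (up : Bool) (numb : Int),
      1 ≤ i →
      m = (length - (parts.flatten.length : Int)).toNat →
      (up = true ↔ (i = 1 ∨ (1 ≤ PySem.Int.mod (i - 1) (2 * (maximum - minimum)) ∧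
                             PySem.Int.mod (i - 1) (2 * (maximum - minimum)) ≤ maximum - minimum))) →
      numb = zigv minimum maximum (i - 1) →
      ascendLoopA length minimum maximum parts.flatten up numb
        = (ascendLoopB length minimum maximum parts ((parts.flatten.length : Int)) i).flatten)
    (i : Int) (parts : List (List Char)) (b : Bool) (X : Int)
    (hi : 1 ≤ i)
    (hk : k = (length - (parts.flatten.length : Int)).toNat)
    (hc : (parts.flatten.length : Int) < length)
    (hup' : (b = true) ↔ (i + 1 = 1 ∨ (1 ≤ PySem.Int.mod i (2 * (maximum - minimum)) ∧
                          PySem.Int.mod i (2 * (maximum - minimum)) ≤ maximum - minimum)))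
    (hz : zigv minimum maximum i = X) :
    ascendLoopA length minimum maximum (parts.flatten ++ PySem.Int.toChars X) b X
      = (ascendLoopB length minimum maximum (parts ++ [PySem.Int.toChars X])
          ((parts.flatten.length : Int) + ((PySem.Int.toChars X).length : Int)) (i + 1)).flatten := by
  have hfl : parts.flatten ++ PySem.Int.toChars X = (parts ++ [PySem.Int.toChars X]).flatten := by simp
  have hln : ((parts.flatten.length : Int) + ((PySem.Int.toChars X).length : Int))
      = (((parts ++ [PySem.Int.toChars X]).flatten.length : Int)) := by
    simp
  rw [hfl, hln]
  refine ih _ ?_ (i + 1) (parts ++ [PySem.Int.toChars X]) b X (by omega) rfl ?_ ?_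
  · have hx := toChars_len_pos X
    simp only [List.flatten_append, List.flatten_cons, List.flatten_nil, List.append_nil,
      List.length_append, hk]
    omega
  · have : i + 1 - 1 = i := by ring
    rw [this]
    exact hup'
  · have : i + 1 - 1 = i := by ring
    rw [this]
    exact hz.symm

-- the central simulation: A's state machine from step i agrees with B's closed-form loop
theorem loop_agree (minimum maximum length : Int) (hlt : minimum < maximum) :
    ∀ (k : Nat) (i : Int) (parts : List (List Char)) (up : Bool) (numb : Int),
      1 ≤ i →
      k = (length - (parts.flatten.length : Int)).toNat →
      (up = true ↔ (i = 1 ∨ (1 ≤ PySem.Int.mod (i - 1) (2 * (maximum - minimum)) ∧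
                             PySem.Int.mod (i - 1) (2 * (maximum - minimum)) ≤ maximum - minimum))) →
      numb = zigv minimum maximum (i - 1) →
      ascendLoopA length minimum maximum parts.flatten up numb
        = (ascendLoopB length minimum maximum parts ((parts.flatten.length : Int)) i).flatten := by
  intro k
  induction k using Nat.strong_induction_on with
  | _ k ih =>
    intro i parts up numb hi hk hup hnumb
    by_cases hc : ((parts.flatten.length : Int) < length)
    · -- both loops take a step
      unfold zigv at hnumb
      rw [loopA_step _ _ _ _ _ _ hc, loopB_step _ _ _ _ _ _ hc]
      have hp : (1:Int) < 2 * (maximum - minimum) := by omega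
      have h0 : 0 ≤ PySem.Int.mod (i - 1) (2 * (maximum - minimum)) :=
        PySem.Int.mod_nonneg _ (by omega)
      have h1 : PySem.Int.mod (i - 1) (2 * (maximum - minimum)) < 2 * (maximum - minimum) :=
        PySem.Int.mod_lt _ (by omega)
      have hms := mod_succ (i - 1) (2 * (maximum - minimum)) hp
      have hii : i - 1 + 1 = i := by ring
      rw [hii] at hms
      have hmod0 : PySem.Int.mod (0:Int) (2 * (maximum - minimum)) = 0 := by
        rw [PySem.Int.mod_eq_emod_of_pos (show (0:Int) < 2 * (maximum - minimum) by omega)]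
        simp
      have hI1 : i = 1 → PySem.Int.mod (i - 1) (2 * (maximum - minimum)) = 0 := by
        intro h; rw [h]; norm_num [hmod0]
      generalize hR0 : PySem.Int.mod (i - 1) (2 * (maximum - minimum)) = r₀ at hup hnumb hms h0 h1 hI1
      generalize hR1 : PySem.Int.mod i (2 * (maximum - minimum)) = r₁ at hms
      have hrD : (r₀ = 2 * (maximum - minimum) - 1 ∧ r₁ = 0) ∨
                 (¬ r₀ = 2 * (maximum - minimum) - 1 ∧ r₁ = r₀ + 1) := by
        by_cases hx : r₀ = 2 * (maximum - minimum) - 1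
        · left; rw [if_pos hx] at hms; exact ⟨hx, hms⟩
        · right; rw [if_neg hx] at hms; exact ⟨hx, hms⟩
      by_cases hb : up = true
      · rw [if_pos hb]
        have hupT := hup.mp hb
        have hr0d : r₀ ≤ maximum - minimum := by
          rcases hupT with h | h
          · have := hI1 h; omega
          · omega
        rw [if_pos hr0d] at hnumb
        by_cases h2 : numb < maximum
        · rw [if_pos h2]
          have hz : zigv minimum maximum i = numb + 1 := by
            unfold zigv; rw [hR1]; split_ifs <;> omega
          rw [hz]
          exact loop_finish length minimum maximum k ih i parts true (numb + 1) hi hk hc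
            (by rw [hR1]; simp; omega) hz
        · rw [if_neg h2]
          have hz : zigv minimum maximum i = numb - 1 := by
            unfold zigv; rw [hR1]; split_ifs <;> omega
          rw [hz]
          exact loop_finish length minimum maximum k ih i parts false (numb - 1) hi hk hc
            (by rw [hR1]; simp; omega) hz
      · rw [if_neg hb]
        have hupF : ¬ (i = 1 ∨ (1 ≤ r₀ ∧ r₀ ≤ maximum - minimum)) := fun h => hb (hup.mpr h)
        have hcase : r₀ = 0 ∨ maximum - minimum < r₀ := by
          by_cases h1r : 1 ≤ r₀
          · right; by_contra hle; exact hupF (Or.inr ⟨h1r, by omega⟩)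
          · left; omega
        by_cases h2 : numb > minimum
        · rw [if_pos h2]
          have hr0d : ¬ r₀ ≤ maximum - minimum := by
            rcases hcase with h | h
            · exfalso; rw [if_pos (by omega : r₀ ≤ maximum - minimum)] at hnumb; omega
            · omega
          rw [if_neg hr0d] at hnumb
          have hz : zigv minimum maximum i = numb - 1 := by
            unfold zigv; rw [hR1]; split_ifs <;> omega
          rw [hz]
          exact loop_finish length minimum maximum k ih i parts false (numb - 1) hi hk hc
            (by rw [hR1]; simp; omega) hz
        · rw [if_neg h2]
          have hr00 : r₀ = 0 := by
            rcases hcase with h | h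
            · exact h
            · exfalso; rw [if_neg (by omega : ¬ r₀ ≤ maximum - minimum)] at hnumb; omega
          rw [if_pos (by omega : r₀ ≤ maximum - minimum)] at hnumb
          have hz : zigv minimum maximum i = numb + 1 := by
            unfold zigv; rw [hR1]; split_ifs <;> omega
          rw [hz]
          exact loop_finish length minimum maximum k ih i parts true (numb + 1) hi hk hc
            (by rw [hR1]; simp; omega) hz
    · rw [loopA_stop _ _ _ _ _ _ hc, loopB_stop _ _ _ _ _ _ hc]

-- a slice xs[:b] with b ≤ -len(xs) is empty
theorem slice_to_nonpos {α : Type} (xs : List α) (b : Int) (h : b + xs.length ≤ 0) :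
    PySem.List.slice xs none (some b) = [] := by
  simp only [PySem.List.slice, PySem.List.clampIdx]
  split_ifs <;> simp <;> omega

-- ===== VERDICT (by name: the statement is the Claim_ definition above) =====
theorem ascend_descend_spec : Claim_equal_ascend_descend := by
  intro length minimum maximum hdom hpre
  unfold Spec_ascend_descend ascend_descend ascend_descend_alt
  unfold Pre_ascend_descend at hpre
  by_cases h1 : maximum < minimum
  · simp [h1]
  · by_cases hneg : 0 ≤ length
    · by_cases h2 : length = 0
      · simp [h2, h1]
      · have hg1 : ¬ (maximum < minimum ∨ length = 0) := by tauto
        have hg2 : ¬ (maximum < minimum ∨ length ≤ 0) := by omega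
        rw [if_neg hg1, if_neg hg2]
        by_cases h3 : minimum = maximum
        · rw [if_pos h3, if_pos h3]
        · rw [if_neg h3, if_neg h3]
          have hlt : minimum < maximum := by omega
          have hc0 : (0:Int) < length := by omega
          have step0 := loopB_step length minimum maximum [] 0 0 hc0
          rw [step0]
          have hz0 : zigv minimum maximum 0 = minimum := by
            unfold zigv
            have hm0 : PySem.Int.mod (0:Int) (2 * (maximum - minimum)) = 0 := by
              rw [PySem.Int.mod_eq_emod_of_pos (show (0:Int) < 2 * (maximum - minimum) by omega)]
              simp
            rw [hm0]
            rw [if_pos (by omega : (0:Int) ≤ maximum - minimum)]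
            ring
          rw [hz0]
          have key := loop_agree minimum maximum length hlt
            ((length - (([PySem.Int.toChars minimum] : List (List Char)).flatten.length : Int)).toNat)
            1 [PySem.Int.toChars minimum] true minimum (by omega) rfl
            (by simp)
            (by
              have hm0 : PySem.Int.mod ((1:Int) - 1) (2 * (maximum - minimum)) = 0 := by
                norm_num
                rw [PySem.Int.mod_eq_emod_of_pos (show (0:Int) < 2 * (maximum - minimum) by omega)]
                simp
              unfold zigv
              rw [hm0, if_pos (by omega : (0:Int) ≤ maximum - minimum)]
              ring)
          have hfl : ([PySem.Int.toChars minimum] : List (List Char)).flatten = PySem.Int.toChars minimum := by simp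
          rw [hfl] at key
          have harg : ((0:Int) + ((PySem.Int.toChars minimum).length : Int))
              = (((PySem.Int.toChars minimum).length : Int)) := by ring
          rw [show ([] ++ [PySem.Int.toChars minimum] : List (List Char)) = [PySem.Int.toChars minimum] by simp,
            harg]
          rw [key]
          norm_num

    · -- length < 0: B returns ""; Pre_ guarantees A returns "" as well
      rw [if_neg (show ¬ (maximum < minimum ∨ length = 0) by omega)]
      rw [if_pos (show maximum < minimum ∨ length ≤ 0 by omega)]
      by_cases h3 : minimum = maximum
      · rw [if_pos h3]
        have h0 : length.toNat = 0 := by omega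
        rw [h0]
        simp
      · rw [if_neg h3]
        have hlen : ((PySem.Int.toChars minimum).length : Int) + length ≤ 0 := by
          rcases hpre with h | h | h | h
          · omega
          · exact absurd h h1
          · exact absurd h h3
          · exact h
        rw [loopA_stop _ _ _ _ _ _ (by omega : ¬ (((PySem.Int.toChars minimum).length : Int) < length))]
        rw [slice_to_nonpos _ _ (by omega)]
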